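-- pv_equiv track=rewrite | github.com/tr1ten/DNA | leetecode/MaximumANDArray.py | maximumANDSum
-- ===== SOURCE A (Python) =====
-- from typing import List
--
-- def maximumANDSum(nums: List[int], nk: int) -> int:
--     nums.extend([0]*(2*nk-len(nums)))
--     n = len(nums)
--     dp =  [0 for i in range(1<<n)]
--     for x in range(1,1<<n):
--         slot = -(-x.bit_count()//2)
--         for i in range(n):
--             if(x&(1<<i)==0): continue
--             dp[x] = max(dp[x],dp[x^(1<<i)] + (nums[i]&slot))
--     return dp[(1<<n)-1]
-- ===== SOURCE B (Python) =====
-- from typing import List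
--
-- def maximumANDSum(nums: List[int], nk: int) -> int:
--     # same in-place padding as A (the argument mutation is preserved)
--     nums.extend([0] * (2 * nk - len(nums)))
--     n = len(nums)
--     memo = {0: 0}
--
--     def best(x):
--         # best AND-sum achievable placing the numbers indexed by the bits of x
--         if x in memo:
--             return memo[x]
--         slot = (x.bit_count() + 1) // 2
--         r = max(best(x ^ (1 << i)) + (nums[i] & slot)
--                 for i in range(n) if x >> i & 1)
--         memo[x] = r
--         return r
--
--     return best((1 << n) - 1)
-- ===== Notes on version B (the rewrite author's own statement) =====
-- stated objective: alternative
-- what changed: Replaces A's bottom-up DP that fills a 2^(2k)-entry list in ascending mask order with a top-down memoized recursion: a DFS over subsets that clears one set bit per call, accumulates the maximum over a generator, and caches results in a dict keyed by mask.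
import Mathlib
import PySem

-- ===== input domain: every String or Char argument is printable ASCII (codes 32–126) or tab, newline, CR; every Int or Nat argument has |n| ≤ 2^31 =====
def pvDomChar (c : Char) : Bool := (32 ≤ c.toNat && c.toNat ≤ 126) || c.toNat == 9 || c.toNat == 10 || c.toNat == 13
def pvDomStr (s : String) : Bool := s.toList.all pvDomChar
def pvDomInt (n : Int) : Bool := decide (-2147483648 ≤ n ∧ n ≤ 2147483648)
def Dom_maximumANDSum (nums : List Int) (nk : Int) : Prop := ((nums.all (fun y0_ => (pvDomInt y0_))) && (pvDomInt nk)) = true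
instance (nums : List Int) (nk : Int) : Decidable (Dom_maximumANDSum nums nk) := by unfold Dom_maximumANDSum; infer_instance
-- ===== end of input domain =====

-- B replaces A's bottom-up table over all bitmasks by a top-down memoized (dict) recursion
-- over the same recurrence (DFS with an Option-max over set bits); objective: alternative
-- decomposition, not speed. Both A and B pad `nums` in place (mutation preserved);
-- the equivalence proved here is about the return value.

-- ===== PORT A =====
-- slot = -(-x.bit_count()//2)
def slotA (x : Nat) : Int :=
  -(PySem.Int.floordiv (-(PySem.Int.bitCount (x : Int) : Int)) 2)

-- the inner `for i in range(n)` loop of A, updating dp[x] in place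
-- (the Python list dp is ported as an Array so the port evaluates in linear time;
--  x is always in bounds, so setIfInBounds is exactly the Python assignment)
def innerA (nums2 : List Int) (n : Nat) (x : Nat) (dp : Array Int) : Array Int :=
  (List.range n).foldl (fun dp i =>
    if x &&& (1 <<< i) == 0 then dp
    else dp.setIfInBounds x (max (dp.getD x 0)
      (dp.getD (x ^^^ (1 <<< i)) 0 + PySem.Int.band (List.getD nums2 i 0) (slotA x)))) dp

def maximumANDSum (nums : List Int) (nk : Int) : Int :=
  let nums2 := nums ++ List.replicate (2 * nk - (nums.length : Int)).toNat 0
  let n := nums2.length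
  let dp0 : Array Int := Array.replicate (1 <<< n) 0
  let dp := (List.range' 1 (1 <<< n - 1)).foldl (fun dp x => innerA nums2 n x dp) dp0
  dp.getD (1 <<< n - 1) 0

-- ===== PORT B =====
-- slot = (x.bit_count() + 1) // 2
def slotB (x : Nat) : Int := ((PySem.Int.bitCount (x : Int) + 1) / 2 : Nat)

-- top-down `best(x)` with a memo dict; fuel only makes the DFS structurally
-- terminating (fuel ≥ x on every call, so the 0-fuel branch is never taken)
-- (the Python memo dict is ported as a hash map so lookups are O(1); only
--  membership test / read / store are used, exactly as in Source B)
def bestB (nums2 : List Int) (n : Nat) : Nat → Nat → Std.HashMap Nat Int → Int × Std.HashMap Nat Int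
  | fuel, x, memo =>
    match memo[x]?, fuel with
    | some v, _ => (v, memo)
    | none, 0 => (0, memo)
    | none, fuel' + 1 =>
      let slot := slotB x
      let p := (List.range n).foldl
        (fun (p : Option Int × Std.HashMap Nat Int) i =>
          if x >>> i &&& 1 == 1 then
            let q := bestB nums2 n fuel' (x ^^^ (1 <<< i)) p.2
            let t := q.1 + PySem.Int.band (List.getD nums2 i 0) slot
            ((match p.1 with
              | none => some t
              | some b => some (max b t)), q.2)
          else p)
        (none, memo)
      (p.1.getD 0, p.2.insert x (p.1.getD 0))

def maximumANDSum_alt (nums : List Int) (nk : Int) : Int :=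
  let nums2 := nums ++ List.replicate (2 * nk - (nums.length : Int)).toNat 0
  let n := nums2.length
  (bestB nums2 n (1 <<< n) (1 <<< n - 1) ((∅ : Std.HashMap Nat Int).insert 0 0)).1

-- ===== PRECONDITION & SPEC =====
def Spec_maximumANDSum (nums : List Int) (nk : Int) (out : Int) : Prop := out = maximumANDSum_alt nums nk
instance (nums : List Int) (nk : Int) (out : Int) : Decidable (Spec_maximumANDSum nums nk out) := by unfold Spec_maximumANDSum; infer_instance

-- ===== CLAIM (what is proved, stated in full; the proofs are below) =====
def Claim_equal_maximumANDSum : Prop := ∀ (nums : List Int) (nk : Int), Dom_maximumANDSum nums nk → Spec_maximumANDSum nums nk (maximumANDSum nums nk)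

-- ===== LEMMAS AND PROOFS =====

-- the common recurrence, with fuel: g (fuel+1) x = max over set bits i of
-- g fuel (x ^ 2^i) + (nums2[i] & slot x), starting from 0
def gF (nums2 : List Int) (n : Nat) : Nat → Nat → Int
  | 0, _ => 0
  | fuel + 1, x =>
    (List.range n).foldl (fun a i =>
      if x.testBit i then
        max a (gF nums2 n fuel (x ^^^ (1 <<< i)) + PySem.Int.band (nums2.getD i 0) (slotB x))
      else a) 0

lemma slot_eq (x : Nat) : slotA x = slotB x := by
  unfold slotA slotB
  rw [PySem.Int.neg_floordiv_neg_eq_iff_of_pos (by omega)]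
  constructor <;> push_cast <;> omega

lemma condA_eq (x i : Nat) : ((x &&& (1 <<< i)) == 0) = !x.testBit i := by
  rcases h : x.testBit i <;>
    simp [Nat.one_shiftLeft, Nat.and_two_pow, h]

lemma condB_eq (x i : Nat) : ((x >>> i &&& 1) == 1) = x.testBit i := by
  simp [Nat.testBit, Nat.and_one_is_mod]

lemma xor_lt (x i : Nat) (h : x.testBit i = true) : x ^^^ (1 <<< i) < x := by
  rw [Nat.one_shiftLeft]
  apply Nat.lt_of_testBit i
  · simp [Nat.testBit_xor, h]
  · exact h
  · intro j hj
    simp [Nat.testBit_xor, Nat.ne_of_lt hj]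

lemma xor_lt_pow (x i n : Nat) (hx : x < 2 ^ n) (hi : i < n) : x ^^^ (1 <<< i) < 2 ^ n := by
  rw [Nat.one_shiftLeft]
  exact Nat.xor_lt_two_pow hx (Nat.pow_lt_pow_right (by omega) hi)

lemma g_zero (nums2 : List Int) (n fuel : Nat) : gF nums2 n fuel 0 = 0 := by
  cases fuel with
  | zero => rfl
  | succ f =>
    show (List.range n).foldl _ 0 = 0
    have : ∀ l : List Nat, l.foldl (fun (a : Int) i =>
        if (0 : Nat).testBit i then
          max a (gF nums2 n f ((0 : Nat) ^^^ (1 <<< i)) + PySem.Int.band (nums2.getD i 0) (slotB 0))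
        else a) 0 = 0 := by
      intro l; induction l with
      | nil => rfl
      | cons hd tl ih =>
        rw [List.foldl_cons, if_neg (by simp [Nat.zero_testBit])]
        exact ih
    exact this _

lemma g_nonneg (nums2 : List Int) (n fuel x : Nat) : 0 ≤ gF nums2 n fuel x := by
  cases fuel with
  | zero => simp [gF]
  | succ f =>
    show (0:Int) ≤ (List.range n).foldl _ 0
    have : ∀ (l : List Nat) (a : Int), a ≤ l.foldl (fun (a : Int) i =>
        if x.testBit i then
          max a (gF nums2 n f (x ^^^ (1 <<< i)) + PySem.Int.band (nums2.getD i 0) (slotB x))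
        else a) a := by
      intro l; induction l with
      | nil => intro a; simp
      | cons hd tl ih =>
        intro a
        refine le_trans ?_ (ih _)
        dsimp only
        split <;> simp
    exact this _ 0

lemma band_slot_nonneg (v : Int) (x : Nat) : 0 ≤ PySem.Int.band v (slotB x) := by
  rw [PySem.Int.band_comm]
  exact PySem.Int.band_nonneg_of_nonneg_left v (by unfold slotB; positivity)

lemma g_fuel_irrel (nums2 : List Int) (n : Nat) :
    ∀ f₁ f₂ x, x ≤ f₁ → x ≤ f₂ → gF nums2 n f₁ x = gF nums2 n f₂ x := by
  intro f₁
  induction f₁ with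
  | zero =>
    intro f₂ x h1 h2
    have : x = 0 := by omega
    subst this
    rw [g_zero, g_zero]
  | succ f ih =>
    intro f₂ x h1 h2
    cases f₂ with
    | zero =>
      have : x = 0 := by omega
      subst this
      rw [g_zero, g_zero]
    | succ f₂ =>
      show (List.range n).foldl _ 0 = (List.range n).foldl _ 0
      congr 1
      funext a i
      by_cases hb : x.testBit i
      · have hlt := xor_lt x i hb
        simp only [hb, if_true]
        rw [ih f₂ _ (by omega) (by omega)]
      · simp [hb]

-- ===== A-side: the table holds gF =====

-- the List-level shadow of A's inner loop, used only by the proofs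
def innerAL (nums2 : List Int) (n : Nat) (x : Nat) (dp : List Int) : List Int :=
  (List.range n).foldl (fun dp i =>
    if x &&& (1 <<< i) == 0 then dp
    else dp.set x (max (dp.getD x 0)
      (dp.getD (x ^^^ (1 <<< i)) 0 + PySem.Int.band (nums2.getD i 0) (slotA x)))) dp

lemma arr_getD (a : Array Int) (i : Nat) (d : Int) : a.getD i d = a.toList.getD i d := by
  by_cases h : i < a.size
  · simp [Array.getD, h, List.getD, Array.getElem_toList]
  · simp [Array.getD, h, List.getD]

lemma innerA_toList (nums2 : List Int) (n x : Nat) (dp : Array Int) :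
    (innerA nums2 n x dp).toList = innerAL nums2 n x dp.toList := by
  unfold innerA innerAL
  induction (List.range n) generalizing dp with
  | nil => rfl
  | cons hd tl ih =>
    rw [List.foldl_cons, List.foldl_cons]
    by_cases hc : (x &&& (1 <<< hd) == 0) = true
    · simp only [hc, if_true]
      exact ih dp
    · simp only [hc, Bool.false_eq_true, if_false]
      rw [ih, Array.toList_setIfInBounds, arr_getD, arr_getD]

lemma innerA_set (nums2 : List Int) (x : Nat) (dp : List Int) (hx : x < dp.length) :
    ∀ (l : List Nat) (a : Int),
      l.foldl (fun dp i =>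
        if x &&& (1 <<< i) == 0 then dp
        else dp.set x (max (dp.getD x 0)
          (dp.getD (x ^^^ (1 <<< i)) 0 + PySem.Int.band (nums2.getD i 0) (slotA x)))) (dp.set x a)
      = dp.set x (l.foldl (fun a i =>
          if x.testBit i then
            max a (dp.getD (x ^^^ (1 <<< i)) 0 + PySem.Int.band (nums2.getD i 0) (slotA x))
          else a) a) := by
  intro l
  induction l with
  | nil => intro a; rfl
  | cons hd tl ih =>
    intro a
    by_cases hb : x.testBit hd
    · have hc : ((x &&& (1 <<< hd)) == 0) = false := by rw [condA_eq, hb]; rfl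
      have e1 : (dp.set x a).getD x 0 = a := by
        rw [List.getD_eq_getElem _ 0 (by simpa using hx)]
        exact List.getElem_set_self (by simpa using hx)
      have e2 : (dp.set x a).getD (x ^^^ (1 <<< hd)) 0 = dp.getD (x ^^^ (1 <<< hd)) 0 := by
        simp [List.getD, List.getElem?_set_ne (Ne.symm (Nat.ne_of_lt (xor_lt x hd hb)))]
      simp only [List.foldl_cons, hc, hb, Bool.false_eq_true,
        List.set_set, e1, e2]
      exact ih _
    · have hb' : x.testBit hd = false := by simpa using hb
      have hc : ((x &&& (1 <<< hd)) == 0) = true := by rw [condA_eq, hb']; rfl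
      simp only [List.foldl_cons, hc, hb', if_true]
      exact ih _

lemma innerAL_eq (nums2 : List Int) (n x : Nat) (dp : List Int) (hx : x < dp.length) :
    innerAL nums2 n x dp = dp.set x ((List.range n).foldl (fun a i =>
      if x.testBit i then
        max a (dp.getD (x ^^^ (1 <<< i)) 0 + PySem.Int.band (nums2.getD i 0) (slotA x))
      else a) (dp.getD x 0)) := by
  have h0 : dp.set x (dp.getD x 0) = dp := by
    rw [List.getD_eq_getElem dp 0 hx]; exact List.set_getElem_self hx
  unfold innerAL
  conv_lhs => rw [← h0]
  exact innerA_set nums2 x dp hx (List.range n) (dp.getD x 0)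

def dpAfter (nums2 : List Int) (n k : Nat) : List Int :=
  (List.range' 1 k).foldl (fun dp x => innerAL nums2 n x dp)
    (List.replicate (1 <<< n) (0 : Int))

lemma dpAfter_invariant (nums2 : List Int) (n : Nat) :
    ∀ k, k ≤ 2 ^ n - 1 →
      (dpAfter nums2 n k).length = 2 ^ n ∧
      ∀ y, y < 2 ^ n → (dpAfter nums2 n k).getD y 0 =
        if y ≤ k then gF nums2 n (2 ^ n) y else 0 := by
  intro k
  induction k with
  | zero =>
    intro _
    constructor
    · simp [dpAfter, Nat.one_shiftLeft]
    · intro y hy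
      have hz : (List.replicate (1 <<< n) (0 : Int)).getD y 0 = 0 := by
        rw [Nat.one_shiftLeft]
        exact List.getD_replicate _ hy
      simp only [dpAfter, List.range'_zero, List.foldl_nil, hz]
      rcases Nat.eq_zero_or_pos y with h | h
      · subst h; simp [g_zero]
      · simp [Nat.not_le.mpr h]
  | succ k ih =>
    intro hk
    obtain ⟨hlen, hent⟩ := ih (by omega)
    have hxlt : k + 1 < 2 ^ n := by
      have : 1 ≤ 2 ^ n := Nat.one_le_two_pow
      omega
    have hstep : dpAfter nums2 n (k + 1) = innerAL nums2 n (1 + k) (dpAfter nums2 n k) := by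
      unfold dpAfter
      rw [List.range'_1_concat, List.foldl_append]
      rfl
    have h1k : 1 + k = k + 1 := by omega
    rw [h1k] at hstep
    rw [hstep, innerAL_eq nums2 n _ _ (by omega)]
    refine ⟨by simp [hlen], ?_⟩
    intro y hy
    by_cases hyx : y = k + 1
    · subst hyx
      rw [List.getD_eq_getElem _ 0 (by rw [List.length_set, hlen]; omega),
        List.getElem_set_self (by rw [List.length_set, hlen]; omega), if_pos (le_refl _)]
      have hpow : (2:Nat) ^ n = (2 ^ n - 1) + 1 := by
        have : 1 ≤ 2 ^ n := Nat.one_le_two_pow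
        omega
      rw [show gF nums2 n (2 ^ n) (k+1) = gF nums2 n ((2 ^ n - 1) + 1) (k+1) by rw [← hpow]]
      show _ = (List.range n).foldl _ 0
      rw [hent (k+1) hxlt, if_neg (by omega)]
      congr 1
      funext a i
      by_cases hb : (k+1).testBit i
      · simp only [hb, if_true]
        have hylt : (k+1) ^^^ (1 <<< i) < k + 1 := xor_lt _ i hb
        rw [hent _ (by omega), if_pos (by omega), slot_eq,
          g_fuel_irrel nums2 n (2 ^ n) (2 ^ n - 1) _ (by omega) (by omega)]
      · simp [hb]
    · rw [show ((dpAfter nums2 n k).set (k+1) _).getD y 0 = (dpAfter nums2 n k).getD y 0 by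
        simp [List.getD, List.getElem?_set_ne (by omega : (k+1) ≠ y)]]
      rw [hent y hy]
      by_cases hyk : y ≤ k
      · rw [if_pos hyk, if_pos (by omega)]
      · rw [if_neg hyk, if_neg (by omega)]

lemma A_fold_toList (nums2 : List Int) (n : Nat) :
    ∀ (l : List Nat) (dp : Array Int),
      (l.foldl (fun dp x => innerA nums2 n x dp) dp).toList
        = l.foldl (fun dp x => innerAL nums2 n x dp) dp.toList := by
  intro l
  induction l with
  | nil => intro dp; rfl
  | cons hd tl ih =>
    intro dp
    rw [List.foldl_cons, List.foldl_cons, ih, innerA_toList]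

lemma A_eq_g (nums2 : List Int) (n : Nat) :
    ((List.range' 1 (1 <<< n - 1)).foldl (fun dp x => innerA nums2 n x dp)
      (Array.replicate (1 <<< n) (0 : Int))).getD (1 <<< n - 1) 0
    = gF nums2 n (2 ^ n) (2 ^ n - 1) := by
  have h1 : (1:Nat) ≤ 2 ^ n := Nat.one_le_two_pow
  have hmain := (dpAfter_invariant nums2 n (2 ^ n - 1) (le_refl _)).2 (2 ^ n - 1) (by omega)
  rw [if_pos (le_refl _)] at hmain
  rw [arr_getD, A_fold_toList, Array.toList_replicate]
  rw [show (List.range' 1 (1 <<< n - 1)).foldl (fun dp x => innerAL nums2 n x dp)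
      (List.replicate (1 <<< n) (0 : Int)) = dpAfter nums2 n (1 <<< n - 1) from rfl,
    Nat.one_shiftLeft, hmain]

-- ===== B-side: bestB returns gF =====

def MemoInv (nums2 : List Int) (n : Nat) (memo : Std.HashMap Nat Int) : Prop :=
  memo[0]? = some 0 ∧ ∀ k v, memo[k]? = some v → v = gF nums2 n (2 ^ n) k

-- the value contributed by bit i when expanding x
def tPure (nums2 : List Int) (n x i : Nat) : Int :=
  gF nums2 n (2 ^ n) (x ^^^ (1 <<< i)) + PySem.Int.band (nums2.getD i 0) (slotB x)

-- the pure shadow of B's Option-max accumulation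
def stepO (nums2 : List Int) (n x : Nat) (a : Option Int) (i : Nat) : Option Int :=
  if x.testBit i then
    (match a with
      | none => some (tPure nums2 n x i)
      | some b => some (max b (tPure nums2 n x i)))
  else a

lemma tPure_nonneg (nums2 : List Int) (n x i : Nat) : 0 ≤ tPure nums2 n x i := by
  unfold tPure
  have h1 := g_nonneg nums2 n (2 ^ n) (x ^^^ (1 <<< i))
  have h2 := band_slot_nonneg (nums2.getD i 0) x
  omega

lemma optfold_some (nums2 : List Int) (n x : Nat) :
    ∀ (l : List Nat) (a : Int), l.foldl (stepO nums2 n x) (some a)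
      = some (l.foldl (fun b i => if x.testBit i then max b (tPure nums2 n x i) else b) a) := by
  intro l
  induction l with
  | nil => intro a; rfl
  | cons hd tl ih =>
    intro a
    simp only [List.foldl_cons, stepO]
    by_cases hb : x.testBit hd
    · simp only [hb, if_true]
      exact ih _
    · simp only [hb]
      exact ih _

lemma optfold_getD (nums2 : List Int) (n x : Nat) :
    ∀ (l : List Nat), (l.foldl (stepO nums2 n x) none).getD 0
      = l.foldl (fun b i => if x.testBit i then max b (tPure nums2 n x i) else b) 0 := by
  intro l
  induction l with
  | nil => rfl
  | cons hd tl ih =>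
    simp only [List.foldl_cons, stepO]
    by_cases hb : x.testBit hd
    · simp only [hb, if_true]
      rw [optfold_some, Option.getD_some,
        show max (0:Int) (tPure nums2 n x hd) = tPure nums2 n x hd by
          have := tPure_nonneg nums2 n x hd; omega]
    · simp only [hb]
      exact ih

lemma zerofold_eq_g (nums2 : List Int) (n x : Nat) (hx : x < 2 ^ n) :
    (List.range n).foldl (fun b i => if x.testBit i then max b (tPure nums2 n x i) else b) 0
      = gF nums2 n (2 ^ n) x := by
  have h1 : (1:Nat) ≤ 2 ^ n := Nat.one_le_two_pow
  have hpow : (2:Nat) ^ n = (2 ^ n - 1) + 1 := by omega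
  rw [show gF nums2 n (2 ^ n) x = gF nums2 n ((2 ^ n - 1) + 1) x by rw [← hpow]]
  show _ = (List.range n).foldl _ 0
  congr 1
  funext a i
  by_cases hb : x.testBit i
  · simp only [hb, if_true]
    have hylt : x ^^^ (1 <<< i) < x := xor_lt _ i hb
    rw [tPure, g_fuel_irrel nums2 n (2 ^ n) (2 ^ n - 1) _ (by omega) (by omega)]
  · simp [hb]

lemma foldB_aux (nums2 : List Int) (n fuel x : Nat) (hxf : x ≤ fuel + 1)
    (IH : ∀ x' memo, MemoInv nums2 n memo → x' ≤ fuel → x' < 2 ^ n →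
      (bestB nums2 n fuel x' memo).1 = gF nums2 n (2 ^ n) x' ∧
      MemoInv nums2 n (bestB nums2 n fuel x' memo).2)
    (hx2 : x < 2 ^ n) :
    ∀ (l : List Nat), (∀ i ∈ l, i < n) → ∀ (p : Option Int × Std.HashMap Nat Int), MemoInv nums2 n p.2 →
      MemoInv nums2 n ((l.foldl
        (fun (p : Option Int × Std.HashMap Nat Int) i =>
          if x >>> i &&& 1 == 1 then
            let q := bestB nums2 n fuel (x ^^^ (1 <<< i)) p.2
            let t := q.1 + PySem.Int.band (nums2.getD i 0) (slotB x)
            ((match p.1 with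
              | none => some t
              | some b => some (max b t)), q.2)
          else p) p)).2 ∧
      (l.foldl
        (fun (p : Option Int × Std.HashMap Nat Int) i =>
          if x >>> i &&& 1 == 1 then
            let q := bestB nums2 n fuel (x ^^^ (1 <<< i)) p.2
            let t := q.1 + PySem.Int.band (nums2.getD i 0) (slotB x)
            ((match p.1 with
              | none => some t
              | some b => some (max b t)), q.2)
          else p) p).1 = l.foldl (stepO nums2 n x) p.1 := by
  intro l
  induction l with
  | nil => intro _ p hp; exact ⟨hp, rfl⟩
  | cons hd tl ih =>
    intro hl p hp
    by_cases hb : x.testBit hd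
    · have hc : ((x >>> hd &&& 1) == 1) = true := by rw [condB_eq, hb]
      have hy2 : x ^^^ (1 <<< hd) < 2 ^ n := xor_lt_pow x hd n hx2 (hl hd (by simp))
      have hyf : x ^^^ (1 <<< hd) ≤ fuel := by
        have := xor_lt x hd hb; omega
      obtain ⟨hq1, hq2⟩ := IH (x ^^^ (1 <<< hd)) p.2 hp hyf hy2
      have hacc : ((match p.1 with
          | none => some ((bestB nums2 n fuel (x ^^^ (1 <<< hd)) p.2).1
              + PySem.Int.band (nums2.getD hd 0) (slotB x))
          | some b => some (max b ((bestB nums2 n fuel (x ^^^ (1 <<< hd)) p.2).1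
              + PySem.Int.band (nums2.getD hd 0) (slotB x)))) : Option Int)
          = stepO nums2 n x p.1 hd := by
        rw [hq1]
        simp only [stepO, hb, if_true]
        rfl
      obtain ⟨ih1, ih2⟩ := ih (fun i hi => hl i (by simp [hi]))
        (((match p.1 with
          | none => some ((bestB nums2 n fuel (x ^^^ (1 <<< hd)) p.2).1
              + PySem.Int.band (nums2.getD hd 0) (slotB x))
          | some b => some (max b ((bestB nums2 n fuel (x ^^^ (1 <<< hd)) p.2).1
              + PySem.Int.band (nums2.getD hd 0) (slotB x)))),
          (bestB nums2 n fuel (x ^^^ (1 <<< hd)) p.2).2)) hq2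
      simp only [List.foldl_cons, hc, if_true]
      exact ⟨ih1, by rw [ih2, hacc]⟩
    · have hb' : x.testBit hd = false := by simpa using hb
      have hc : ((x >>> hd &&& 1) == 1) = false := by rw [condB_eq, hb']
      have hs : stepO nums2 n x p.1 hd = p.1 := by simp [stepO, hb']
      simp only [List.foldl_cons, hc, Bool.false_eq_true, if_false, hs]
      exact ih (fun i hi => hl i (by simp [hi])) p hp

lemma bestB_correct (nums2 : List Int) (n : Nat) :
    ∀ fuel x memo, MemoInv nums2 n memo → x ≤ fuel → x < 2 ^ n →
      (bestB nums2 n fuel x memo).1 = gF nums2 n (2 ^ n) x ∧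
      MemoInv nums2 n (bestB nums2 n fuel x memo).2 := by
  intro fuel
  induction fuel with
  | zero =>
    intro x memo hInv hxf hx2
    have hx0 : x = 0 := by omega
    subst hx0
    rw [bestB.eq_def]; dsimp only; rw [hInv.1]
    exact ⟨(g_zero nums2 n (2 ^ n)).symm, hInv⟩
  | succ fuel ih =>
    intro x memo hInv hxf hx2
    rcases hmem : memo[x]? with _ | v
    · -- miss
      have hx0 : x ≠ 0 := by
        intro h; subst h; rw [hInv.1] at hmem; exact absurd hmem (by simp)
      rw [bestB.eq_def]; dsimp only; rw [hmem]
      obtain ⟨hi1, hi2⟩ := foldB_aux nums2 n fuel x hxf ih hx2 (List.range n)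
        (fun i hi => List.mem_range.mp hi) (none, memo) hInv
      simp only
      refine ⟨?_, ?_, ?_⟩
      · rw [hi2, optfold_getD, zerofold_eq_g nums2 n x hx2]
      · rw [Std.HashMap.getElem?_insert, if_neg (by simpa using hx0)]
        exact hi1.1
      · intro k v hkv
        rw [Std.HashMap.getElem?_insert] at hkv
        split at hkv
        · rename_i hkx
          have hxk : x = k := by simpa using hkx
          subst hxk
          rw [← (Option.some_inj.mp hkv), hi2, optfold_getD, zerofold_eq_g nums2 n x hx2]
        · exact hi1.2 k v hkv
    · -- hit
      rw [bestB.eq_def]; dsimp only; rw [hmem]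
      exact ⟨hInv.2 x v hmem, hInv⟩

lemma initMemoInv (nums2 : List Int) (n : Nat) :
    MemoInv nums2 n ((∅ : Std.HashMap Nat Int).insert 0 0) := by
  constructor
  · simp
  · intro k v h
    rw [Std.HashMap.getElem?_insert] at h
    split at h
    · rename_i hk
      have hk0 : k = 0 := (eq_of_beq hk).symm
      subst hk0
      rw [g_zero]
      simpa using h.symm
    · simp at h

-- ===== VERDICT (by name: the statement is the Claim_ definition above) =====
theorem maximumANDSum_spec : Claim_equal_maximumANDSum := by
  intro nums nk _
  unfold Spec_maximumANDSum maximumANDSum maximumANDSum_alt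
  set nums2 := nums ++ List.replicate (2 * nk - (nums.length : Int)).toNat 0 with hn2
  set n := nums2.length with hn
  have h1 : (1:Nat) ≤ 2 ^ n := Nat.one_le_two_pow
  have hB := (bestB_correct nums2 n (1 <<< n) (1 <<< n - 1) ((∅ : Std.HashMap Nat Int).insert 0 0)
    (initMemoInv nums2 n) (by omega) (by rw [Nat.one_shiftLeft]; omega)).1
  rw [Nat.one_shiftLeft] at hB
  rw [A_eq_g nums2 n]
  simp only [Nat.one_shiftLeft]
  rw [hB]
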